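-- pv_equiv track=rewrite | github.com/nzitonda3/Pcracking_detectionTool | pcfg_utils.py | estimate_guesses
-- ===== SOURCE A (Python) =====
-- def identify_pattern_and_groups(password):
--     groups = []
--     cur = None
--     cnt = 0
--     for ch in password:
--         cls = 'L' if ch.islower() else ('U' if ch.isupper() else ('D' if ch.isdigit() else 'S'))
--         if cls == cur:
--             cnt += 1
--         else:
--             if cur is not None:
--                 groups.append((cur, cnt))
--             cur = cls
--             cnt = 1
--     if cur is not None:
--         groups.append((cur, cnt))
--     pattern = ''.join([f"{g[0]}{g[1]}" for g in groups])
--     return pattern, groups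
--
-- def estimate_guesses(password):
--     """Estimate guesses needed to crack password using common wordlist ranking.
--
--     This uses a realistic approach: if password is in common wordlist, rank it low.
--     Otherwise, estimate based on character composition complexity.
--     """
--     pattern, groups = identify_pattern_and_groups(password)
--
--     # Common passwords and their estimated rank in typical wordlists
--     COMMON_PASSWORDS = {
--         'password': 1,
--         '123456': 2,
--         '12345678': 3,
--         'qwerty': 4,
--         'abc123': 5,
--         'monkey': 6,
--         '1234567': 7,
--         'letmein': 8,
--         'trustno1': 9,
--         'dragon': 10,
--     }
--
--     pwd_lower = password.lower()
--     if pwd_lower in COMMON_PASSWORDS: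
--         return COMMON_PASSWORDS[pwd_lower], pattern
--
--     # For uncommon passwords, estimate based on pattern complexity
--     # Length multiplier
--     length_score = len(password) * 50
--
--     # Complexity bonus
--     has_lower = any(c.islower() for c in password)
--     has_upper = any(c.isupper() for c in password)
--     has_digit = any(c.isdigit() for c in password)
--     has_symbol = any(not c.isalnum() for c in password)
--
--     complexity = sum([has_lower, has_upper, has_digit, has_symbol])
--     complexity_score = 100 * (complexity ** 2)  # Non-linear increase
--
--     guesses = length_score + complexity_score
--     return max(guesses, 100), pattern
-- ===== SOURCE B (Python) =====
-- # B: run-length pattern built by recursive span-splitting over the precomputed class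
-- # list; complexity derived as the number of distinct character classes instead of
-- # four separate any() scans.  Objective: simpler decomposition, same results.
--
-- COMMON_PASSWORDS = {
--     'password': 1, '123456': 2, '12345678': 3, 'qwerty': 4, 'abc123': 5,
--     'monkey': 6, '1234567': 7, 'letmein': 8, 'trustno1': 9, 'dragon': 10,
-- }
--
--
-- def _cls(ch):
--     if ch.islower():
--         return 'L'
--     if ch.isupper():
--         return 'U'
--     if ch.isdigit():
--         return 'D'
--     return 'S'
--
--
-- def _runs(cs):
--     """Run-length encode a class list: [(class, run_length), ...]."""
--     if not cs:
--         return []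
--     c = cs[0]
--     k = 1
--     while k < len(cs) and cs[k] == c:
--         k += 1
--     return [(c, k)] + _runs(cs[k:])
--
--
-- def estimate_guesses(password):
--     cs = [_cls(ch) for ch in password]
--     pattern = ''.join(c + str(k) for c, k in _runs(cs))
--     low = password.lower()
--     if low in COMMON_PASSWORDS:
--         return COMMON_PASSWORDS[low], pattern
--     complexity = len(set(cs))
--     return max(len(cs) * 50 + 100 * complexity * complexity, 100), pattern
-- ===== Notes on version B (the rewrite author's own statement) =====
-- stated objective: simpler
-- what changed: B run-length-encodes the precomputed class list by recursive span-splitting instead of A's stateful cur/cnt accumulator loop, and computes the complexity bonus as the number of distinct character classes (len(set(cs))) instead of four separate any() scans over the password.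
import Mathlib
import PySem

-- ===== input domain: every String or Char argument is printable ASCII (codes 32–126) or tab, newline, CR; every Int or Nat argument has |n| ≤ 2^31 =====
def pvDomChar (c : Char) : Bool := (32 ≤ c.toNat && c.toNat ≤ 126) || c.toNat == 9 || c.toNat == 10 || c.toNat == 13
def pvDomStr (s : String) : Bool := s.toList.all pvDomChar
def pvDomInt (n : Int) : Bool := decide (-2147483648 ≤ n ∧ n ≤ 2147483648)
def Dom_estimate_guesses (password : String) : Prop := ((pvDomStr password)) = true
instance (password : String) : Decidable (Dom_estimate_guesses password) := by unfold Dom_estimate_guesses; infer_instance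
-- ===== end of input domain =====

-- B replaces A's stateful run-length loop by recursive span-splitting over the class list
-- and derives the complexity count from the distinct classes instead of four any() scans
-- (objective: simpler decomposition; same results).

-- ===== PORT A =====
-- A's loop body, acting on the already-computed class character
def pvStepA' (st : List (Char × Int) × Option Char × Int) (cls : Char) :
    List (Char × Int) × Option Char × Int :=
  if st.2.1 == some cls then (st.1, st.2.1, st.2.2 + 1)
  else
    match st.2.1 with
    | some c => (st.1 ++ [(c, st.2.2)], some cls, 1)
    | none => (st.1, some cls, 1)

-- A's loop body on the raw character (computes cls exactly as the Python does)
def pvStepA (st : List (Char × Int) × Option Char × Int) (ch : Char) :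
    List (Char × Int) × Option Char × Int :=
  pvStepA' st
    (if PySem.Chars.islower ch then 'L'
     else if PySem.Chars.isupper ch then 'U'
     else if PySem.Chars.isdigit ch then 'D' else 'S')

-- the trailing 'if cur is not None: groups.append((cur, cnt))'
def pvFinalize (st : List (Char × Int) × Option Char × Int) : List (Char × Int) :=
  match st.2.1 with
  | some c => st.1 ++ [(c, st.2.2)]
  | none => st.1

def identify_pattern_and_groups (password : String) : String × List (Char × Int) :=
  let st := password.toList.foldl pvStepA ([], none, 0)
  let groups := pvFinalize st
  let pattern := PySem.Str.join "" (groups.map fun g => String.ofList (g.1 :: PySem.Int.toChars g.2))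
  (pattern, groups)

def pvCommonA : PySem.Dict String Int :=
  PySem.Dict.ofList [("password", 1), ("123456", 2), ("12345678", 3), ("qwerty", 4),
    ("abc123", 5), ("monkey", 6), ("1234567", 7), ("letmein", 8), ("trustno1", 9), ("dragon", 10)]

def estimate_guesses (password : String) : Int × String :=
  let pg := identify_pattern_and_groups password
  let pattern := pg.1
  let pwd_lower := PySem.Str.lower password
  match pvCommonA.get? pwd_lower with
  | some r => (r, pattern)
  | none =>
    let length_score : Int := PySem.Str.len password * 50
    let has_lower := password.toList.any PySem.Chars.islower
    let has_upper := password.toList.any PySem.Chars.isupper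
    let has_digit := password.toList.any PySem.Chars.isdigit
    let has_symbol := password.toList.any fun c => !PySem.Chars.isalnum c
    let complexity : Int := (if has_lower then 1 else 0) + (if has_upper then 1 else 0)
      + (if has_digit then 1 else 0) + (if has_symbol then 1 else 0)
    let complexity_score := 100 * complexity ^ 2
    let guesses := length_score + complexity_score
    (max guesses 100, pattern)

-- ===== PORT B =====
def pvCls (ch : Char) : Char :=
  if PySem.Chars.islower ch then 'L'
  else if PySem.Chars.isupper ch then 'U'
  else if PySem.Chars.isdigit ch then 'D' else 'S'

-- Source B's _runs: span off the leading run, recurse on the remainder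
def pvRuns : List Char → List (Char × Int)
  | [] => []
  | c :: t =>
    let k := (t.takeWhile (fun x => x == c)).length + 1
    (c, (k : Int)) :: pvRuns ((c :: t).drop k)
termination_by cs => cs.length
decreasing_by
  simp only [List.length_drop, List.length_cons]
  omega

def pvCommonB : PySem.Dict String Int :=
  PySem.Dict.ofList [("password", 1), ("123456", 2), ("12345678", 3), ("qwerty", 4),
    ("abc123", 5), ("monkey", 6), ("1234567", 7), ("letmein", 8), ("trustno1", 9), ("dragon", 10)]

def estimate_guesses_alt (password : String) : Int × String :=
  let cs := password.toList.map pvCls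
  let pattern := PySem.Str.join ""
    ((pvRuns cs).map fun g => String.ofList (g.1 :: PySem.Int.toChars g.2))
  let low := PySem.Str.lower password
  match pvCommonB.get? low with
  | some r => (r, pattern)
  | none =>
    let complexity : Int := (PySem.Set.ofList cs).length
    (max ((cs.length : Int) * 50 + 100 * complexity * complexity) 100, pattern)

-- ===== PRECONDITION & SPEC =====
def Spec_estimate_guesses (password : String) (out : Int × String) : Prop := out = estimate_guesses_alt password
instance (password : String) (out : Int × String) : Decidable (Spec_estimate_guesses password out) := by unfold Spec_estimate_guesses; infer_instance

-- ===== CLAIM (what is proved, stated in full; the proofs are below) =====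
def Claim_equal_estimate_guesses : Prop := ∀ (password : String), Dom_estimate_guesses password → Spec_estimate_guesses password (estimate_guesses password)

-- ===== LEMMAS AND PROOFS =====

theorem drop_tw (p : Char → Bool) : ∀ l : List Char, l.drop (l.takeWhile p).length = l.dropWhile p
  | [] => rfl
  | x :: t => by
    by_cases h : p x <;> simp [h, drop_tw p t]

theorem pvRuns_cons (c : Char) (t : List Char) :
    pvRuns (c :: t)
      = (c, (((t.takeWhile (fun x => x == c)).length + 1 : Nat) : Int))
          :: pvRuns ((c :: t).drop ((t.takeWhile (fun x => x == c)).length + 1)) := by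
  rw [pvRuns]

theorem clsL (ch : Char) : pvCls ch = 'L' ↔ PySem.Chars.islower ch = true := by
  unfold pvCls
  split_ifs with h1 h2 h3 <;> simp_all

theorem lower_not_upper {c : Char} (h : PySem.Chars.islower c = true) :
    PySem.Chars.isupper c = false := by
  simp only [PySem.Chars.islower, Bool.and_eq_true, decide_eq_true_eq] at h
  simp only [PySem.Chars.isupper, Bool.and_eq_false_iff, decide_eq_false_iff_not]
  right
  intro h2
  exact absurd (le_trans h.1 h2) (by decide)

theorem lower_not_digit {c : Char} (h : PySem.Chars.islower c = true) :
    PySem.Chars.isdigit c = false := by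
  simp only [PySem.Chars.islower, Bool.and_eq_true, decide_eq_true_eq] at h
  simp only [PySem.Chars.isdigit, Bool.and_eq_false_iff, decide_eq_false_iff_not]
  right
  intro h2
  exact absurd (le_trans h.1 h2) (by decide)

theorem upper_not_digit {c : Char} (h : PySem.Chars.isupper c = true) :
    PySem.Chars.isdigit c = false := by
  simp only [PySem.Chars.isupper, Bool.and_eq_true, decide_eq_true_eq] at h
  simp only [PySem.Chars.isdigit, Bool.and_eq_false_iff, decide_eq_false_iff_not]
  right
  intro h2
  exact absurd (le_trans h.1 h2) (by decide)

theorem clsU (ch : Char) : pvCls ch = 'U' ↔ PySem.Chars.isupper ch = true := by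
  unfold pvCls
  split_ifs with h1 h2 h3 <;> simp_all [lower_not_upper]

theorem clsD (ch : Char) : pvCls ch = 'D' ↔ PySem.Chars.isdigit ch = true := by
  unfold pvCls
  split_ifs with h1 h2 h3 <;>
    simp_all [lower_not_digit, upper_not_digit]

theorem clsS (ch : Char) : pvCls ch = 'S' ↔ (!PySem.Chars.isalnum ch) = true := by
  unfold pvCls
  simp only [PySem.Chars.isalnum, PySem.Chars.isalpha]
  split_ifs with h1 h2 h3 <;> simp_all

theorem cls_mem (ch : Char) : pvCls ch ∈ ['L', 'U', 'D', 'S'] := by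
  unfold pvCls
  split_ifs <;> simp

theorem set_len (cs : List Char) (h : ∀ x ∈ cs, x ∈ ['L', 'U', 'D', 'S']) :
    ((PySem.Set.ofList cs).length : Int)
      = (if 'L' ∈ cs then 1 else 0) + (if 'U' ∈ cs then 1 else 0)
        + (if 'D' ∈ cs then 1 else 0) + (if 'S' ∈ cs then 1 else 0) := by
  have hnodup : (PySem.Set.ofList cs).Nodup := PySem.Set.nodup_ofList cs
  have hfil : (['L', 'U', 'D', 'S'].filter (fun y => decide (y ∈ cs))).Nodup :=
    List.Nodup.filter _ (by decide)
  have hperm : List.Perm (PySem.Set.ofList cs)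
      (['L', 'U', 'D', 'S'].filter (fun y => decide (y ∈ cs))) := by
    rw [List.perm_ext_iff_of_nodup hnodup hfil]
    intro a
    simp only [PySem.Set.mem_ofList, List.mem_filter, decide_eq_true_eq]
    constructor
    · intro ha; exact ⟨h a ha, ha⟩
    · intro ha; exact ha.2
  rw [hperm.length_eq]
  by_cases hL : 'L' ∈ cs <;> by_cases hU : 'U' ∈ cs <;> by_cases hD : 'D' ∈ cs <;>
    by_cases hS : 'S' ∈ cs <;> simp [List.filter, hL, hU, hD, hS]

theorem foldA_runs : ∀ (cs : List Char) (groups : List (Char × Int)) (c : Char) (cnt : Int),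
    pvFinalize (cs.foldl pvStepA' (groups, some c, cnt))
      = groups ++ (c, cnt + ((cs.takeWhile (fun x => x == c)).length : Int))
          :: pvRuns (cs.dropWhile (fun x => x == c))
  | [], groups, c, cnt => by simp [pvFinalize, pvRuns]
  | x :: t, groups, c, cnt => by
    rw [List.foldl_cons]
    by_cases hx : x = c
    · subst hx
      have hstep : pvStepA' (groups, some x, cnt) x = (groups, some x, cnt + 1) := by
        simp [pvStepA']
      rw [hstep, foldA_runs t groups x (cnt + 1)]
      simp only [List.takeWhile_cons, beq_self_eq_true, if_true, List.dropWhile_cons,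
        List.length_cons]
      push_cast
      ring_nf
    · have hcx : ¬ c = x := fun h => hx h.symm
      have hstep : pvStepA' (groups, some c, cnt) x = (groups ++ [(c, cnt)], some x, 1) := by
        simp [pvStepA', hcx]
      rw [hstep, foldA_runs t (groups ++ [(c, cnt)]) x 1]
      have hxc : (x == c) = false := by simp [hx]
      simp only [List.takeWhile_cons, hxc, Bool.false_eq_true, if_false, List.length_nil,
        List.dropWhile_cons]
      rw [pvRuns_cons]
      simp only [List.drop_succ_cons, drop_tw, List.append_assoc, List.cons_append,
        List.nil_append]
      push_cast
      ring_nf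

theorem groupsA_eq (chars : List Char) :
    pvFinalize (chars.foldl pvStepA ([], none, 0)) = pvRuns (chars.map pvCls) := by
  have hmap : chars.foldl pvStepA ([], none, 0)
      = (chars.map pvCls).foldl pvStepA' ([], none, 0) := by
    rw [List.foldl_map]
    rfl
  rw [hmap]
  cases hcs : chars.map pvCls with
  | nil => simp [pvFinalize, pvRuns]
  | cons c0 t =>
    rw [List.foldl_cons]
    have hstep : pvStepA' ([], none, 0) c0 = ([], some c0, 1) := by
      simp [pvStepA']
    rw [hstep, foldA_runs t [] c0 1, pvRuns_cons]
    simp only [List.drop_succ_cons, drop_tw, List.nil_append]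
    push_cast
    ring_nf

theorem memL (chars : List Char) :
    ('L' ∈ chars.map pvCls) = (chars.any PySem.Chars.islower = true) := by
  simp only [eq_iff_iff, List.mem_map, List.any_eq_true]
  constructor
  · rintro ⟨a, ha, hc⟩; exact ⟨a, ha, (clsL a).1 hc⟩
  · rintro ⟨a, ha, hc⟩; exact ⟨a, ha, (clsL a).2 hc⟩

theorem memU (chars : List Char) :
    ('U' ∈ chars.map pvCls) = (chars.any PySem.Chars.isupper = true) := by
  simp only [eq_iff_iff, List.mem_map, List.any_eq_true]
  constructor
  · rintro ⟨a, ha, hc⟩; exact ⟨a, ha, (clsU a).1 hc⟩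
  · rintro ⟨a, ha, hc⟩; exact ⟨a, ha, (clsU a).2 hc⟩

theorem memD (chars : List Char) :
    ('D' ∈ chars.map pvCls) = (chars.any PySem.Chars.isdigit = true) := by
  simp only [eq_iff_iff, List.mem_map, List.any_eq_true]
  constructor
  · rintro ⟨a, ha, hc⟩; exact ⟨a, ha, (clsD a).1 hc⟩
  · rintro ⟨a, ha, hc⟩; exact ⟨a, ha, (clsD a).2 hc⟩

theorem memS (chars : List Char) :
    ('S' ∈ chars.map pvCls) = (chars.any (fun c => !PySem.Chars.isalnum c) = true) := by
  simp only [eq_iff_iff, List.mem_map, List.any_eq_true]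
  constructor
  · rintro ⟨a, ha, hc⟩; exact ⟨a, ha, (clsS a).1 hc⟩
  · rintro ⟨a, ha, hc⟩; exact ⟨a, ha, (clsS a).2 hc⟩

theorem main_eq (p : String) : estimate_guesses p = estimate_guesses_alt p := by
  have hpat : pvFinalize (p.toList.foldl pvStepA ([], none, 0)) = pvRuns (p.toList.map pvCls) :=
    groupsA_eq p.toList
  have hdict : pvCommonA = pvCommonB := rfl
  simp only [estimate_guesses, estimate_guesses_alt, identify_pattern_and_groups, hpat, hdict]
  cases hg : pvCommonB.get? (PySem.Str.lower p) with
  | some r => rfl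
  | none =>
    simp only []
    congr 1
    have hcpl : ((PySem.Set.ofList (p.toList.map pvCls)).length : Int)
        = (if p.toList.any PySem.Chars.islower then 1 else 0)
          + (if p.toList.any PySem.Chars.isupper then 1 else 0)
          + (if p.toList.any PySem.Chars.isdigit then 1 else 0)
          + (if p.toList.any (fun c => !PySem.Chars.isalnum c) then 1 else 0) := by
      rw [set_len (p.toList.map pvCls) (by
        intro x hx
        rcases List.mem_map.1 hx with ⟨a, _, rfl⟩
        exact cls_mem a)]
      simp only [memL, memU, memD, memS]
    have hlen : PySem.Str.len p = ((p.toList.map pvCls).length : Int) := by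
      simp [PySem.Str.len]
    rw [hlen, ← hcpl]
    ring_nf

-- ===== VERDICT (by name: the statement is the Claim_ definition above) =====
theorem estimate_guesses_spec : Claim_equal_estimate_guesses := by
  intro p _
  unfold Spec_estimate_guesses
  exact main_eq p
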